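-- pv_equiv track=rewrite | github.com/SenayGe/merl-env | mimic_patient_discharge_dataset_construction.py | icd_code_matches_categories
-- ===== SOURCE A (Python) =====
-- from typing import Any, Dict, List, Optional, Tuple
--
-- DIAGNOSIS_CATEGORIES = {
--     # 1. Cardiovascular
--     "hypertension": ["I10", "I11", "I12", "I13", "I15"],
--     "heart_failure": ["I50"],
--     "ischemic_heart_disease": ["I20", "I21", "I22", "I24", "I25"],
--     "valvular_heart_disease": ["I34", "I35", "I36", "I37"],
--     "arrhythmia": ["I47", "I48", "I49"],
--     "stroke": ["I60", "I61", "I62", "I63", "I69"],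
--     # 2. Infectious / Sepsis
--     "sepsis": ["A40", "A41", "R65.2"],
--     "pneumonia": ["J12", "J13", "J14", "J15", "J16", "J17", "J18", "J69"],
--     "uti": ["N39.0", "N30"],
--     "skin_infection": ["L03", "L00", "L01", "L02", "L08"],
--     # 3. Respiratory
--     "respiratory_failure": ["J96"],
--     "copd_asthma": ["J44", "J45"],
--     # 4. Metabolic / Renal / GI
--     "diabetes": ["E08", "E09", "E10", "E11", "E13"],
--     "kidney_failure": ["N17", "N18", "N19"],
--     "fluid_electrolyte": ["E86", "E87"],
--     "gi_bleed": ["K92", "I85"],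
--     "liver_disease": ["K70", "K71", "K72", "K73", "K74"],
--     # 5. Trauma / Other
--     "intracranial_injury": ["S06"],
--     "fracture": ["S02", "S12", "S22", "S32", "S42", "S52", "S62", "S72", "S82"],
--     "substance_abuse": ["F10", "F11", "F12", "F13", "F14", "F15", "F16", "F19"],
--     # 6. Obstetrics
--     "obstetric": ["O"],
-- }
--
-- def icd_code_matches_categories(
--     icd_code: Optional[str],
--     target_categories: Optional[set] = None,
--     target_prefixes: Optional[List[str]] = None,
-- ) -> bool:
--     """
--     Check whether an ICD code belongs to any of the requested diagnosis categories.
--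
--     Args:
--         icd_code: Raw ICD code string (e.g. "I501", "J189", "O80")
--         target_categories: Set of category names from DIAGNOSIS_CATEGORIES to accept.
--                            If None, no category-based filtering is applied.
--         target_prefixes: Flattened list of ICD prefixes derived from target_categories.
--                          Pass this for performance when calling in a loop.
--
--     Returns:
--         True if the code matches at least one target category.
--     """
--     if not icd_code:
--         return False
--     code = str(icd_code).strip().upper().replace(".", "")
--     if not code:
--         return False
--
--     # Build prefixes on the fly if not pre-computed
--     if target_prefixes is None:
--         if target_categories is None:
--             return True  # no filter
--         target_prefixes = []
--         for cat in target_categories: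
--             target_prefixes.extend(DIAGNOSIS_CATEGORIES.get(cat, []))
--
--     # Normalize prefixes (remove dots for matching)
--     for pfx in target_prefixes:
--         norm_pfx = pfx.replace(".", "").upper()
--         if code.startswith(norm_pfx):
--             return True
--     return False
-- ===== SOURCE B (Python) =====
-- from typing import Any, Dict, List, Optional, Tuple
--
-- DIAGNOSIS_CATEGORIES = {
--     "hypertension": ["I10", "I11", "I12", "I13", "I15"],
--     "heart_failure": ["I50"],
--     "ischemic_heart_disease": ["I20", "I21", "I22", "I24", "I25"],
--     "valvular_heart_disease": ["I34", "I35", "I36", "I37"],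
--     "arrhythmia": ["I47", "I48", "I49"],
--     "stroke": ["I60", "I61", "I62", "I63", "I69"],
--     "sepsis": ["A40", "A41", "R65.2"],
--     "pneumonia": ["J12", "J13", "J14", "J15", "J16", "J17", "J18", "J69"],
--     "uti": ["N39.0", "N30"],
--     "skin_infection": ["L03", "L00", "L01", "L02", "L08"],
--     "respiratory_failure": ["J96"],
--     "copd_asthma": ["J44", "J45"],
--     "diabetes": ["E08", "E09", "E10", "E11", "E13"],
--     "kidney_failure": ["N17", "N18", "N19"],
--     "fluid_electrolyte": ["E86", "E87"],
--     "gi_bleed": ["K92", "I85"],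
--     "liver_disease": ["K70", "K71", "K72", "K73", "K74"],
--     "intracranial_injury": ["S06"],
--     "fracture": ["S02", "S12", "S22", "S32", "S42", "S52", "S62", "S72", "S82"],
--     "substance_abuse": ["F10", "F11", "F12", "F13", "F14", "F15", "F16", "F19"],
--     "obstetric": ["O"],
-- }
--
--
-- def icd_code_matches_categories(icd_code, target_categories=None, target_prefixes=None):
--     code = str(icd_code).strip().upper().replace(".", "") if icd_code else ""
--     if not code:
--         return False
--     if target_prefixes is None and target_categories is None:
--         return True  # no filter
--     if target_prefixes is None:
--         prefixes = [p for cat in target_categories for p in DIAGNOSIS_CATEGORIES.get(cat, [])]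
--     else:
--         prefixes = target_prefixes
--     # Normalized prefixes go into a set once; then test the code's OWN prefixes
--     # code[:i] for membership, instead of a startswith scan over the prefix list.
--     norm = {p.replace(".", "").upper() for p in prefixes}
--     return any(code[:i] in norm for i in range(len(code) + 1))
-- ===== Notes on version B (the rewrite author's own statement) =====
-- stated objective: alternative
-- what changed: A uses an early-return chain and scans the prefix list testing code.startswith on each; B normalizes the code in one expression, builds the normalized prefixes into a set once, and instead iterates over the code's own prefixes code[:i], testing set membership.
import Mathlib
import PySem

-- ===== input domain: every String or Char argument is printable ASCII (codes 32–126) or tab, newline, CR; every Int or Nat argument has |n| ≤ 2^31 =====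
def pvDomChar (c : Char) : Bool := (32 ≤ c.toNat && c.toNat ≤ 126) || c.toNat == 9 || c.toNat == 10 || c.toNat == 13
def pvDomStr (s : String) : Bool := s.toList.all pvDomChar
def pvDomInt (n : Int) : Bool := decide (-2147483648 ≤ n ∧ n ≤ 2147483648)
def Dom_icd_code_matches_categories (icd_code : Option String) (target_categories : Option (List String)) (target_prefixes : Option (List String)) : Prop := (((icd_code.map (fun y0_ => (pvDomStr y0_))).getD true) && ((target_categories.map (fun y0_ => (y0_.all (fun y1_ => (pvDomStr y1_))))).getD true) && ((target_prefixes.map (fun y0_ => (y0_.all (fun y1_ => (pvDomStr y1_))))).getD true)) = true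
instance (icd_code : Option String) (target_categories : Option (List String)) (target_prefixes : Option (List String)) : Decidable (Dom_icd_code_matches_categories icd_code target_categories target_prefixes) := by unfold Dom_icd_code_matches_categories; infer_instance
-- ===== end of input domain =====

-- B replaces A's early-return chain and startswith scan over the prefix list by a single
-- normalization step plus membership of the code's own prefixes in a pre-normalized set
-- (objective: alternative traversal / data structure; same cost on these short codes).

-- DIAGNOSIS_CATEGORIES, module constant (shared by both ports, as in the Python module)
def pvDiagCategories : PySem.Dict String (List String) := PySem.Dict.ofList [
  ("hypertension", ["I10", "I11", "I12", "I13", "I15"]),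
  ("heart_failure", ["I50"]),
  ("ischemic_heart_disease", ["I20", "I21", "I22", "I24", "I25"]),
  ("valvular_heart_disease", ["I34", "I35", "I36", "I37"]),
  ("arrhythmia", ["I47", "I48", "I49"]),
  ("stroke", ["I60", "I61", "I62", "I63", "I69"]),
  ("sepsis", ["A40", "A41", "R65.2"]),
  ("pneumonia", ["J12", "J13", "J14", "J15", "J16", "J17", "J18", "J69"]),
  ("uti", ["N39.0", "N30"]),
  ("skin_infection", ["L03", "L00", "L01", "L02", "L08"]),
  ("respiratory_failure", ["J96"]),
  ("copd_asthma", ["J44", "J45"]),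
  ("diabetes", ["E08", "E09", "E10", "E11", "E13"]),
  ("kidney_failure", ["N17", "N18", "N19"]),
  ("fluid_electrolyte", ["E86", "E87"]),
  ("gi_bleed", ["K92", "I85"]),
  ("liver_disease", ["K70", "K71", "K72", "K73", "K74"]),
  ("intracranial_injury", ["S06"]),
  ("fracture", ["S02", "S12", "S22", "S32", "S42", "S52", "S62", "S72", "S82"]),
  ("substance_abuse", ["F10", "F11", "F12", "F13", "F14", "F15", "F16", "F19"]),
  ("obstetric", ["O"])]

-- ===== PORT A =====
-- A's 'target_prefixes = []; for cat in target_categories: target_prefixes.extend(DIAGNOSIS_CATEGORIES.get(cat, []))'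
-- (Python iterates a set of category names here; the order of the built list depends on set
--  order, but the list is consumed only by an order-insensitive any-match, so folding the
--  given list is exact for the returned bool)
def pvBuildPrefixesA (cats : List String) : List String :=
  cats.foldl (fun acc cat => acc ++ pvDiagCategories.getD cat []) []

def icd_code_matches_categories (icd_code : Option String) (target_categories : Option (List String)) (target_prefixes : Option (List String)) : Bool :=
  -- if not icd_code: return False
  match icd_code with
  | none => false
  | some s =>
    if s = "" then false
    else
      -- code = str(icd_code).strip().upper().replace(".", "")
      let code := PySem.Str.replace (PySem.Str.upper (PySem.Str.strip s)) "." ""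
      if code = "" then false
      else
        -- build prefixes on the fly if not pre-computed, then the startswith scan
        match target_prefixes with
        | some ps =>
          ps.any (fun pfx => PySem.Str.startswith code (PySem.Str.upper (PySem.Str.replace pfx "." "")))
        | none =>
          match target_categories with
          | none => true   -- no filter
          | some cats =>
            (pvBuildPrefixesA cats).any
              (fun pfx => PySem.Str.startswith code (PySem.Str.upper (PySem.Str.replace pfx "." "")))

-- ===== PORT B =====
-- 'code = str(icd_code).strip().upper().replace(".", "") if icd_code else ""', then one
-- guard, the prefix list as a comprehension (→ flatMap), a normalized set, and
-- 'any(code[:i] in norm for i in range(len(code) + 1))'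
def icd_code_matches_categories_alt (icd_code : Option String) (target_categories : Option (List String)) (target_prefixes : Option (List String)) : Bool :=
  let code : String :=
    match icd_code with
    | none => ""
    | some s => if s = "" then "" else PySem.Str.replace (PySem.Str.upper (PySem.Str.strip s)) "." ""
  if code = "" then false
  else if target_prefixes.isNone && target_categories.isNone then true  -- no filter
  else
    let prefixes : List String :=
      match target_prefixes with
      | some ps => ps
      | none => (target_categories.getD []).flatMap (fun cat => pvDiagCategories.getD cat [])
    let norm : PySem.Set String :=
      PySem.Set.ofList (prefixes.map (fun p => PySem.Str.upper (PySem.Str.replace p "." "")))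
    (List.range (code.toList.length + 1)).any
      (fun i => PySem.Set.contains norm (PySem.Str.slice code none (some (i : Int))))

-- ===== PRECONDITION & SPEC =====
def Spec_icd_code_matches_categories (icd_code : Option String) (target_categories : Option (List String)) (target_prefixes : Option (List String)) (out : Bool) : Prop := out = icd_code_matches_categories_alt icd_code target_categories target_prefixes
instance (icd_code : Option String) (target_categories : Option (List String)) (target_prefixes : Option (List String)) (out : Bool) : Decidable (Spec_icd_code_matches_categories icd_code target_categories target_prefixes out) := by unfold Spec_icd_code_matches_categories; infer_instance

-- ===== CLAIM (what is proved, stated in full; the proofs are below) =====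
def Claim_equal_icd_code_matches_categories : Prop := ∀ (icd_code : Option String) (target_categories : Option (List String)) (target_prefixes : Option (List String)), Dom_icd_code_matches_categories icd_code target_categories target_prefixes → Spec_icd_code_matches_categories icd_code target_categories target_prefixes (icd_code_matches_categories icd_code target_categories target_prefixes)

-- ===== LEMMAS AND PROOFS =====
-- A's startswith scan over a prefix list equals B's membership scan of the code's prefixes
-- in the normalized set of the same list.
theorem pv_scan_eq (code : String) (prefixes : List String) :
    prefixes.any (fun pfx => PySem.Str.startswith code (PySem.Str.upper (PySem.Str.replace pfx "." "")))
    = (List.range (code.toList.length + 1)).any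
        (fun i => PySem.Set.contains
          (PySem.Set.ofList (prefixes.map (fun p => PySem.Str.upper (PySem.Str.replace p "." ""))))
          (PySem.Str.slice code none (some (i : Int)))) := by
  rw [Bool.eq_iff_iff]
  simp only [List.any_eq_true, PySem.Str.startswith_eq, PySem.Chars.startswith_iff,
    PySem.Set.contains_iff, PySem.Set.mem_ofList, List.mem_map, List.mem_range]
  constructor
  · rintro ⟨p, hp, hpre⟩
    refine ⟨(PySem.Str.upper (PySem.Str.replace p "." "")).toList.length, ?_, p, hp, ?_⟩
    · have := hpre.length_le; omega
    · apply String.toList_inj.mp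
      simp only [PySem.Str.toList_slice, PySem.Chars.slice_eq_listSlice,
        PySem.List.slice_to_natCast]
      exact List.prefix_iff_eq_take.mp hpre
  · rintro ⟨i, _, p, hp, hEq⟩
    refine ⟨p, hp, ?_⟩
    have h := congrArg String.toList hEq
    simp only [PySem.Str.toList_slice, PySem.Chars.slice_eq_listSlice,
      PySem.List.slice_to_natCast] at h
    rw [h]
    exact List.take_prefix i code.toList

-- A's foldl-extend prefix build is the flatMap B's comprehension denotes
theorem pv_build_eq (cats : List String) :
    pvBuildPrefixesA cats = cats.flatMap (fun cat => pvDiagCategories.getD cat []) := by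
  unfold pvBuildPrefixesA
  simpa using PySem.List.foldl_append_eq_flatMap (fun cat => pvDiagCategories.getD cat []) cats []

-- ===== VERDICT (by name: the statement is the Claim_ definition above) =====
theorem icd_code_matches_categories_spec : Claim_equal_icd_code_matches_categories := by
  intro icd_code target_categories target_prefixes _
  unfold Spec_icd_code_matches_categories icd_code_matches_categories icd_code_matches_categories_alt
  cases icd_code with
  | none => rfl
  | some s =>
    by_cases hs : s = ""
    · simp only [if_pos hs, if_true]
    · simp only [if_neg hs]
      by_cases hc : PySem.Str.replace (PySem.Str.upper (PySem.Str.strip s)) "." "" = ""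
      · simp only [if_pos hc]
      · simp only [if_neg hc]
        cases target_prefixes with
        | some ps =>
          simp only [Option.isNone_some, Bool.false_and, Bool.false_eq_true, if_false]
          exact pv_scan_eq _ ps
        | none =>
          cases target_categories with
          | none => simp only [Option.isNone_none, Bool.and_self, if_true]
          | some cats =>
            simp only [Option.isNone_none, Option.isNone_some, Bool.true_and,
              Bool.false_eq_true, if_false, Option.getD_some]
            rw [pv_build_eq]
            exact pv_scan_eq _ _
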